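-- pv_equiv track=rewrite | github.com/dennisjlee/adventofcode | 2021/day7.py | part1
-- ===== SOURCE A (Python) =====
-- import math
--
-- def part1(position_counts: dict[int, int]) -> int:
--     unique_positions = position_counts.keys()
--     best_cost = math.inf
--     for dest in range(min(unique_positions), max(unique_positions) + 1):
--         cost = sum(abs(pos - dest) * count for pos, count in position_counts.items())
--         if cost < best_cost:
--             best_cost = cost
--
--     return best_cost
-- ===== SOURCE B (Python) =====
-- def part1(position_counts: dict[int, int]) -> int:
--     # weighted sum of |pos - dest| is piecewise linear with breakpoints at the
--     # keys, so its minimum over the whole range is attained at a key: sort the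
--     # items once and slide the destination from key to key, updating the cost
--     # incrementally from the slope instead of recomputing it for every dest.
--     items = sorted(position_counts.items(), key=lambda pc: pc[0])
--     total = sum(c for _, c in items)
--     p0 = items[0][0]
--     cost = sum((p - p0) * c for p, c in items)
--     best = cost
--     left = 0
--     prev = p0
--     for p, c in items:
--         cost += (p - prev) * (2 * left - total)
--         if cost < best:
--             best = cost
--         left += c
--         prev = p
--     return best
-- ===== Notes on version B (the rewrite author's own statement) =====
-- stated objective: faster
-- what changed: A scans every integer destination from min(keys) to max(keys) and recomputes the full weighted cost at each; B sorts the items once and sweeps only over the keys, updating the cost incrementally from the running slope, using that the cost is piecewise linear with breakpoints at the keys so its minimum is attained at a key.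
import Mathlib
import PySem

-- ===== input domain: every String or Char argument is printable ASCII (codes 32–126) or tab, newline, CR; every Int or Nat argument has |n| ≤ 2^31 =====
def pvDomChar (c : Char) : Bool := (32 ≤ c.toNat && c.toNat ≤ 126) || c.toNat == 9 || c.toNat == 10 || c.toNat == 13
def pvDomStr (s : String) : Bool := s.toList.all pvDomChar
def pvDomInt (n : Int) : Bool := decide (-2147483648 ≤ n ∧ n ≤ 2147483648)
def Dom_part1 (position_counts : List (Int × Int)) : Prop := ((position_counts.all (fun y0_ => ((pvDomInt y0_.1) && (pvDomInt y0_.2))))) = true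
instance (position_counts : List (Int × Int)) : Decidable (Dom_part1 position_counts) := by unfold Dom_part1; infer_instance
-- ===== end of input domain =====

-- B replaces A's scan of every integer destination between min and max (recomputing the
-- weighted cost from scratch at each) by one sort of the items and a single incremental
-- sweep over the keys, using that the cost is piecewise linear with breakpoints at the keys.

-- ===== PORT A =====
def part1 (position_counts : List (Int × Int)) : Int :=
  let d := PySem.Dict.ofList position_counts
  let uniquePositions := d.keys
  match PySem.List.min? uniquePositions (fun x => x), PySem.List.max? uniquePositions (fun x => x) with
  | some mn, some mx =>
      -- best_cost starts at math.inf: `none` plays inf, any integer cost is below it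
      let best := (PySem.List.pyRange mn (mx + 1) 1).foldl
        (fun (best : Option Int) dest =>
          let cost := (d.items.map (fun pc => |pc.1 - dest| * pc.2)).sum
          match best with
          | none => some cost
          | some b => if cost < b then some cost else some b) none
      best.getD 0
  | _, _ => 0   -- min()/max() of an empty dict raise ValueError; excluded by Pre_

-- ===== PORT B =====
def part1_alt (position_counts : List (Int × Int)) : Int :=
  let d := PySem.Dict.ofList position_counts
  let items := PySem.List.sorted d.items (fun pc => pc.1) false
  match items with
  | [] => 0   -- items[0][0] raises IndexError on an empty dict; excluded by Pre_
  | (p0, _) :: _ =>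
      let total := (items.map (fun pc => pc.2)).sum
      let cost0 := (items.map (fun pc => (pc.1 - p0) * pc.2)).sum
      let st := items.foldl
        (fun (st : Int × Int × Int × Int) pc =>
          let cost := st.1 + (pc.1 - st.2.2.2) * (2 * st.2.2.1 - total)
          let best := if cost < st.2.1 then cost else st.2.1
          (cost, best, st.2.2.1 + pc.2, pc.1)) (cost0, cost0, 0, p0)
      st.2.1

-- ===== PRECONDITION & SPEC =====
-- Pre_ excludes only the empty dict, on which A raises ValueError (min() of an empty sequence).
def Pre_part1 (position_counts : List (Int × Int)) : Prop := position_counts ≠ []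
instance (position_counts : List (Int × Int)) : Decidable (Pre_part1 position_counts) := by unfold Pre_part1; infer_instance
def pvWitness_part1 : (List (Int × Int)) := [(1, 2), (3, 1)]
def Spec_part1 (position_counts : List (Int × Int)) (out : Int) : Prop := out = part1_alt position_counts
instance (position_counts : List (Int × Int)) (out : Int) : Decidable (Spec_part1 position_counts out) := by unfold Spec_part1; infer_instance

-- ===== CLAIM (what is proved, stated in full; the proofs are below) =====
def Claim_equal_part1 : Prop := ∀ (position_counts : List (Int × Int)), Dom_part1 position_counts → Pre_part1 position_counts → Spec_part1 position_counts (part1 position_counts)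

-- ===== LEMMAS AND PROOFS =====

-- total weighted distance to `dest`, the quantity both programs minimise
def pvC (ps : List (Int × Int)) (dest : Int) : Int := (ps.map (fun pc => |pc.1 - dest| * pc.2)).sum
-- weight at keys ≤ p, and the slope of pvC just right of p
def pvWle (ps : List (Int × Int)) (p : Int) : Int := (ps.map (fun pc => if pc.1 ≤ p then pc.2 else 0)).sum
def pvS (ps : List (Int × Int)) (p : Int) : Int := (ps.map (fun pc => if pc.1 ≤ p then pc.2 else -pc.2)).sum
def pvTot (ps : List (Int × Int)) : Int := (ps.map (fun pc => pc.2)).sum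

lemma pvS_eq (ps : List (Int × Int)) (p : Int) : pvS ps p = 2 * pvWle ps p - pvTot ps := by
  induction ps with
  | nil => simp [pvS, pvWle, pvTot]
  | cons pc ps ih =>
      simp only [pvS, pvWle, pvTot, List.map_cons, List.sum_cons] at *
      split_ifs <;> omega

lemma pvC_affine (ps : List (Int × Int)) (p q t : Int)
    (hsep : ∀ pc ∈ ps, pc.1 ≤ p ∨ q ≤ pc.1) (h1 : p ≤ t) (h2 : t ≤ q) :
    pvC ps t = pvC ps p + (t - p) * pvS ps p := by
  induction ps with
  | nil => simp [pvC, pvS]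
  | cons pc ps ih =>
      have hrest := ih (fun x hx => hsep x (List.mem_cons_of_mem _ hx))
      have hhead := hsep pc (List.mem_cons_self ..)
      simp only [pvC, pvS, List.map_cons, List.sum_cons] at *
      by_cases hle : pc.1 ≤ p
      · rw [if_pos hle, abs_of_nonpos (by omega), abs_of_nonpos (by omega)]
        linarith [hrest]
      · have hq : q ≤ pc.1 := hhead.resolve_left hle
        rw [if_neg hle, abs_of_nonneg (by omega), abs_of_nonneg (by omega)]
        linarith [hrest]

lemma pv_update_items_length (ps : List (Int × Int)) :
    ∀ d : PySem.Dict Int Int, d.items.length ≤ (d.update ps).items.length := by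
  induction ps with
  | nil => intro d; simp [PySem.Dict.update]
  | cons pc ps ih =>
      intro d
      have h1 : d.items.length ≤ (d.insert pc.1 pc.2).items.length := by
        by_cases hc : d.contains pc.1 = true <;>
          simp [PySem.Dict.insert, hc]
      calc d.items.length ≤ (d.insert pc.1 pc.2).items.length := h1
        _ ≤ ((d.insert pc.1 pc.2).update ps).items.length := ih _
        _ = (d.update (pc :: ps)).items.length := by simp [PySem.Dict.update]

lemma pv_items_ne_nil (xs : List (Int × Int)) (h : xs ≠ []) : (PySem.Dict.ofList xs).items ≠ [] := by
  match xs, h with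
  | pc :: t, _ =>
      have h0 : (PySem.Dict.empty.insert pc.1 pc.2 : PySem.Dict Int Int).items.length = 1 := by
        simp [PySem.Dict.insert, PySem.Dict.empty, PySem.Dict.contains]
      have := pv_update_items_length t (PySem.Dict.empty.insert pc.1 pc.2)
      have hlen : 1 ≤ (PySem.Dict.ofList (pc :: t)).items.length := by
        simpa [PySem.Dict.ofList, PySem.Dict.update, h0] using this
      intro hnil
      rw [hnil] at hlen
      simp at hlen

-- greatest key ≤ d (and, mirrored, least key ≥ d)
lemma pv_exists_greatest_le (ks : List Int) (d : Int) (hne : ∃ y ∈ ks, y ≤ d) :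
    ∃ p ∈ ks, p ≤ d ∧ ∀ k ∈ ks, k ≤ d → k ≤ p := by
  induction ks with
  | nil => simp at hne
  | cons a ks ih =>
      by_cases hb : ∃ y ∈ ks, y ≤ d
      · obtain ⟨p, hp, hpd, hmax⟩ := ih hb
        by_cases had : a ≤ d
        · refine ⟨max a p, ?_, by omega, ?_⟩
          · rcases max_choice a p with h | h <;> rw [h]
            · exact List.mem_cons_self ..
            · exact List.mem_cons_of_mem _ hp
          · intro k hk hkd
            rcases List.mem_cons.1 hk with rfl | hk'
            · omega
            · exact le_trans (hmax k hk' hkd) (le_max_right _ _)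
        · refine ⟨p, List.mem_cons_of_mem _ hp, hpd, ?_⟩
          intro k hk hkd
          rcases List.mem_cons.1 hk with rfl | hk'
          · omega
          · exact hmax k hk' hkd
      · have had : a ≤ d := by
          obtain ⟨y, hy, hyd⟩ := hne
          rcases List.mem_cons.1 hy with rfl | hy'
          · exact hyd
          · exact absurd ⟨y, hy', hyd⟩ hb
        refine ⟨a, List.mem_cons_self .., had, ?_⟩
        intro k hk hkd
        rcases List.mem_cons.1 hk with rfl | hk'
        · omega
        · exact absurd ⟨k, hk', hkd⟩ hb

lemma pv_exists_least_ge (ks : List Int) (d : Int) (hne : ∃ y ∈ ks, d ≤ y) :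
    ∃ q ∈ ks, d ≤ q ∧ ∀ k ∈ ks, d ≤ k → q ≤ k := by
  obtain ⟨y, hy, hyd⟩ := hne
  obtain ⟨p, hp, hpd, hmax⟩ := pv_exists_greatest_le (ks.map (fun k => -k)) (-d)
    ⟨-y, List.mem_map_of_mem hy, by omega⟩
  obtain ⟨q, hq, rfl⟩ := List.mem_map.1 hp
  refine ⟨q, hq, by omega, ?_⟩
  intro k hk hkd
  have := hmax (-k) (List.mem_map_of_mem hk) (by omega)
  omega

-- the bridge: the minimum over the whole integer range is attained at a key
lemma pv_bridge (ps : List (Int × Int)) (d mn mx : Int)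
    (hmn : mn ∈ ps.map (·.1)) (hmx : mx ∈ ps.map (·.1))
    (h1 : mn ≤ d) (h2 : d ≤ mx) :
    ∃ k ∈ ps.map (·.1), pvC ps k ≤ pvC ps d := by
  by_cases hd : d ∈ ps.map (·.1)
  · exact ⟨d, hd, le_refl _⟩
  · obtain ⟨p, hp, hpd, hmaxp⟩ := pv_exists_greatest_le (ps.map (·.1)) d ⟨mn, hmn, h1⟩
    obtain ⟨q, hq, hdq, hminq⟩ := pv_exists_least_ge (ps.map (·.1)) d ⟨mx, hmx, h2⟩
    have hsep : ∀ pc ∈ ps, pc.1 ≤ p ∨ q ≤ pc.1 := by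
      intro pc hpc
      have hk : pc.1 ∈ ps.map (·.1) := List.mem_map_of_mem hpc
      by_cases h : pc.1 ≤ d
      · exact Or.inl (hmaxp _ hk h)
      · exact Or.inr (hminq _ hk (by omega))
    have hpq : p ≤ q := le_trans hpd hdq
    have hCd : pvC ps d = pvC ps p + (d - p) * pvS ps p := pvC_affine ps p q d hsep hpd (by omega)
    have hCq : pvC ps q = pvC ps p + (q - p) * pvS ps p := pvC_affine ps p q q hsep hpq (le_refl _)
    by_cases hS : 0 ≤ pvS ps p
    · refine ⟨p, hp, ?_⟩
      nlinarith [mul_nonneg (by omega : (0:Int) ≤ d - p) hS]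
    · refine ⟨q, hq, ?_⟩
      nlinarith [mul_nonpos_of_nonneg_of_nonpos (by omega : (0:Int) ≤ q - d) (by omega : pvS ps p ≤ 0)]

lemma pv_sum_ite_key_eq (ps : List (Int × Int)) (k c : Int)
    (hnd : (ps.map (·.1)).Nodup) (hm : (k, c) ∈ ps) :
    (ps.map (fun pc => if pc.1 = k then pc.2 else 0)).sum = c := by
  induction ps with
  | nil => cases hm
  | cons pc ps ih =>
      simp only [List.map_cons, List.sum_cons]
      simp only [List.map_cons, List.nodup_cons] at hnd
      rcases List.mem_cons.1 hm with rfl | hm'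
      · rw [if_pos rfl]
        have hz : (ps.map (fun pc => if pc.1 = k then pc.2 else 0)).sum = 0 := by
          rw [List.sum_eq_zero]
          intro x hx
          obtain ⟨pc', hpc', rfl⟩ := List.mem_map.1 hx
          have : pc'.1 ≠ k := by
            intro h
            exact hnd.1 (by simpa [h] using (List.mem_map_of_mem hpc' : pc'.1 ∈ ps.map (·.1)))
          simp [this]
        omega
      · have hne : pc.1 ≠ k := by
          intro h
          exact hnd.1 (by simpa [h] using (List.mem_map_of_mem hm' : (k, c).1 ∈ ps.map (·.1)))
        rw [if_neg hne, ih hnd.2 hm']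
        omega

-- A's loop: option-valued running minimum over the remaining destinations
lemma pvA_loop (ps : List (Int × Int)) (t : List Int) (v : Int) :
    ∃ r, t.foldl
        (fun (best : Option Int) dest =>
          let cost := (ps.map (fun pc => |pc.1 - dest| * pc.2)).sum
          match best with
          | none => some cost
          | some b => if cost < b then some cost else some b) (some v) = some r ∧
      r ≤ v ∧ (r = v ∨ ∃ y ∈ t, r = pvC ps y) ∧ ∀ y ∈ t, r ≤ pvC ps y := by
  induction t generalizing v with
  | nil => exact ⟨v, rfl, le_refl _, Or.inl rfl, by simp⟩
  | cons y t ih =>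
      rw [List.foldl_cons]
      have hstep : (fun (best : Option Int) dest =>
          let cost := (ps.map (fun pc => |pc.1 - dest| * pc.2)).sum
          match best with
          | none => some cost
          | some b => if cost < b then some cost else some b) (some v) y
          = some (if pvC ps y < v then pvC ps y else v) := by
        simp [pvC]
        split_ifs <;> simp
      simp only [hstep]
      obtain ⟨r, hfold, hle, hatt, hlb⟩ := ih (if pvC ps y < v then pvC ps y else v)
      refine ⟨r, hfold, ?_, ?_, ?_⟩
      · split_ifs at hle <;> omega
      · rcases hatt with h | ⟨z, hz, hzeq⟩
        · split_ifs at h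
          · exact Or.inr ⟨y, List.mem_cons_self .., h⟩
          · exact Or.inl h
        · exact Or.inr ⟨z, List.mem_cons_of_mem _ hz, hzeq⟩
      · intro z hz
        rcases List.mem_cons.1 hz with rfl | hz'
        · split_ifs at hle <;> omega
        · exact hlb z hz' 

-- B's loop: starting at a state describing prefix `≤ prev`, the sweep yields the running minimum
lemma pvB_loop (ps : List (Int × Int)) (hnd : (ps.map (·.1)).Nodup) :
    ∀ (rest : List (Int × Int)) (cost best left prev : Int),
    rest.Pairwise (fun a b => a.1 < b.1) →
    (∀ pc ∈ rest, pc ∈ ps) →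
    (∀ pc ∈ rest, prev < pc.1) →
    (∀ pc ∈ ps, pc.1 ≤ prev ∨ pc.1 ∈ rest.map (·.1)) →
    cost = pvC ps prev →
    left = pvWle ps prev →
    ∃ cF bF lF pF, rest.foldl
        (fun (st : Int × Int × Int × Int) pc =>
          let cost := st.1 + (pc.1 - st.2.2.2) * (2 * st.2.2.1 - pvTot ps)
          let best := if cost < st.2.1 then cost else st.2.1
          (cost, best, st.2.2.1 + pc.2, pc.1)) (cost, best, left, prev) = (cF, bF, lF, pF) ∧
      bF ≤ best ∧ (bF = best ∨ ∃ pc ∈ rest, bF = pvC ps pc.1) ∧ ∀ pc ∈ rest, bF ≤ pvC ps pc.1 := by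
  intro rest
  induction rest with
  | nil =>
      intro cost best left prev _ _ _ _ _ _
      exact ⟨cost, best, left, prev, rfl, le_refl _, Or.inl rfl, by simp⟩
  | cons kc rest ih =>
      intro cost best left prev hpw hsub hgt h4 hcost hleft
      obtain ⟨hklt, hpw'⟩ := List.pairwise_cons.1 hpw
      have hkmem : kc ∈ ps := hsub kc (List.mem_cons_self ..)
      have hprevk : prev < kc.1 := hgt kc (List.mem_cons_self ..)
      -- separation of ps at [prev, kc.1]
      have hsep : ∀ pc ∈ ps, pc.1 ≤ prev ∨ kc.1 ≤ pc.1 := by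
        intro pc hpc
        rcases h4 pc hpc with h | h
        · exact Or.inl h
        · rw [List.map_cons] at h
          rcases List.mem_cons.1 h with h' | h'
          · exact Or.inr (le_of_eq h'.symm)
          · obtain ⟨pc', hpc', heq⟩ := List.mem_map.1 h'
            have := hklt pc' hpc'
            omega
      -- the incremental cost update lands exactly on pvC at the new key
      have hcost' : cost + (kc.1 - prev) * (2 * left - pvTot ps) = pvC ps kc.1 := by
        have := pvC_affine ps prev kc.1 kc.1 hsep (le_of_lt hprevk) (le_refl _)
        rw [this, pvS_eq, hcost, hleft]
      -- the accumulated weight update lands exactly on pvWle at the new key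
      have hleft' : left + kc.2 = pvWle ps kc.1 := by
        have hsplit : pvWle ps kc.1 = pvWle ps prev +
            (ps.map (fun pc => if pc.1 = kc.1 then pc.2 else 0)).sum := by
          have hcg : ps.map (fun pc => if pc.1 ≤ kc.1 then pc.2 else 0)
              = ps.map (fun pc => (if pc.1 ≤ prev then pc.2 else 0) + (if pc.1 = kc.1 then pc.2 else 0)) := by
            apply List.map_congr_left
            intro pc hpc
            rcases hsep pc hpc with h | h
            · rw [if_pos h, if_pos (by omega), if_neg (by omega)]
              omega
            · by_cases he : pc.1 = kc.1
              · rw [if_pos (le_of_eq he), if_neg (by omega), if_pos he]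
                omega
              · rw [if_neg (by omega), if_neg (by omega), if_neg he]
                omega
          simp only [pvWle, hcg]
          rw [PySem.List.sum_map_add_int]
        have hnodupkey := pv_sum_ite_key_eq ps kc.1 kc.2 hnd hkmem
        omega
      have hnd' : (ps.map (·.1)).Nodup := hnd
      obtain ⟨cF, bF, lF, pF, hfold, hble, hatt, hlb⟩ := ih
        (cost + (kc.1 - prev) * (2 * left - pvTot ps))
        (if cost + (kc.1 - prev) * (2 * left - pvTot ps) < best then
            cost + (kc.1 - prev) * (2 * left - pvTot ps) else best)
        (left + kc.2) kc.1 hpw'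
        (fun pc hpc => hsub pc (List.mem_cons_of_mem _ hpc))
        (fun pc hpc => hklt pc hpc)
        (by
          intro pc hpc
          rcases h4 pc hpc with h | h
          · exact Or.inl (by omega)
          · rw [List.map_cons] at h
            rcases List.mem_cons.1 h with h' | h'
            · exact Or.inl (le_of_eq h')
            · exact Or.inr h')
        hcost' hleft'
      refine ⟨cF, bF, lF, pF, ?_, ?_, ?_, ?_⟩
      · rw [List.foldl_cons]
        exact hfold
      · split_ifs at hble <;> omega
      · rcases hatt with h | ⟨pc, hpc, hpceq⟩
        · rw [h]
          split_ifs with hc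
          · exact Or.inr ⟨kc, List.mem_cons_self .., by omega⟩
          · exact Or.inl rfl
        · exact Or.inr ⟨pc, List.mem_cons_of_mem _ hpc, hpceq⟩
      · intro pc hpc
        rcases List.mem_cons.1 hpc with rfl | hpc'
        · split_ifs at hble <;> omega
        · exact hlb pc hpc' 

lemma pv_main (xs : List (Int × Int)) (hpre : xs ≠ []) : part1 xs = part1_alt xs := by
  set ps := (PySem.Dict.ofList xs).items with hps
  have hpsne : ps ≠ [] := pv_items_ne_nil xs hpre
  have hnd : (ps.map (·.1)).Nodup := by
    have := PySem.Dict.nodup_keys_ofList xs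
    simpa [PySem.Dict.keys] using this
  set ks := ps.map (·.1) with hksdef
  have hksne : ks ≠ [] := by simpa [hksdef] using hpsne
  -- ---- A side ----
  rcases hmin : PySem.List.min? ks (fun x => x) with _ | mn
  · exact absurd ((PySem.List.min?_eq_none_iff ks (fun x => x)).mp hmin) hksne
  rcases hmax : PySem.List.max? ks (fun x => x) with _ | mx
  · exact absurd ((PySem.List.max?_eq_none_iff ks (fun x => x)).mp hmax) hksne
  have hmnmem : mn ∈ ks := PySem.List.min?_mem hmin
  have hmxmem : mx ∈ ks := PySem.List.max?_mem hmax
  have hmnmin : ∀ y ∈ ks, mn ≤ y := fun y hy => PySem.List.min?_isMin hmin y hy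
  have hmxmax : ∀ y ∈ ks, y ≤ mx := fun y hy => PySem.List.max?_isMax hmax y hy
  have hmnmx : mn ≤ mx := hmxmax mn hmnmem
  have hrange : PySem.List.pyRange mn (mx + 1) 1 = mn :: PySem.List.pyRange (mn + 1) (mx + 1) 1 :=
    PySem.List.pyRange_one_cons (by omega)
  obtain ⟨r, hfoldA, hrle, hratt, hrlb⟩ := pvA_loop ps (PySem.List.pyRange (mn + 1) (mx + 1) 1) (pvC ps mn)
  have hAval : part1 xs = r := by
    simp only [part1, PySem.Dict.keys, ← hps, ← hksdef, hmin, hmax]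
    show ((PySem.List.pyRange mn (mx + 1) 1).foldl
        (fun (best : Option Int) dest =>
          let cost := (ps.map (fun pc => |pc.1 - dest| * pc.2)).sum
          match best with
          | none => some cost
          | some b => if cost < b then some cost else some b) none).getD 0 = r
    rw [hrange, List.foldl_cons]
    have hinit : (let cost := (List.map (fun pc => |pc.1 - mn| * pc.2) ps).sum;
          match (none : Option Int) with
          | none => some cost
          | some b => if cost < b then some cost else some b) = some (pvC ps mn) := rfl
    rw [hinit, hfoldA]
    rfl
  -- A's value is attained somewhere in [mn, mx] and bounds every key's cost
  have hAatt : ∃ d, mn ≤ d ∧ d ≤ mx ∧ r = pvC ps d := by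
    rcases hratt with h | ⟨y, hy, hyeq⟩
    · exact ⟨mn, le_refl _, hmnmx, h⟩
    · have := (PySem.List.mem_pyRange_one).1 hy
      exact ⟨y, by omega, by omega, hyeq⟩
  have hAlb : ∀ k ∈ ks, r ≤ pvC ps k := by
    intro k hk
    by_cases hkm : k = mn
    · exact hkm ▸ hrle
    · have h1 := hmnmin k hk
      have h2 := hmxmax k hk
      exact hrlb k (PySem.List.mem_pyRange_one.2 (by omega))
  -- ---- B side ----
  set its := PySem.List.sorted ps (fun pc => pc.1) false with hitsdef
  have hitsne : its ≠ [] := by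
    rw [hitsdef, Ne, PySem.List.sorted_eq_nil_iff]
    exact hpsne
  rcases hits : its with _ | ⟨⟨p0, c0⟩, tail⟩
  · exact absurd hits hitsne
  have hperm : its.Perm ps := PySem.List.sorted_perm ..
  have hmemits : ∀ pc : Int × Int, pc ∈ its ↔ pc ∈ ps := fun pc => hperm.mem_iff
  have hp0min : ∀ pc ∈ ps, p0 ≤ pc.1 := by
    intro pc hpc
    have := PySem.List.key_head_sorted_le (xs := ps) (key := fun pc : Int × Int => pc.1)
      (by rw [← hitsdef, hits]) pc hpc
    exact this
  have hp0mem : (p0, c0) ∈ ps := (hmemits _).1 (hits ▸ List.mem_cons_self ..)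
  have htot : (its.map (fun pc => pc.2)).sum = pvTot ps := (hperm.map _).sum_eq
  have hcost0 : (its.map (fun pc => (pc.1 - p0) * pc.2)).sum = pvC ps p0 := by
    rw [(hperm.map _).sum_eq, pvC]
    apply congrArg
    apply List.map_congr_left
    intro pc hpc
    rw [abs_of_nonneg (by have := hp0min pc hpc; omega)]
  have hndits : (its.map (·.1)).Nodup := ((hperm.map (·.1)).nodup_iff).2 hnd
  have hpwits : its.Pairwise (fun a b => a.1 < b.1) := by
    have hle : its.Pairwise (fun a b : Int × Int => a.1 ≤ b.1) := by
      rw [hitsdef]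
      exact PySem.List.sorted_pairwise ..
    have hne : its.Pairwise (fun a b : Int × Int => a.1 ≠ b.1) := List.pairwise_map.mp hndits
    exact (hle.and hne).imp (fun h => lt_of_le_of_ne h.1 h.2)
  have hleft0 : c0 = pvWle ps p0 := by
    have hcg : ps.map (fun pc => if pc.1 ≤ p0 then pc.2 else 0)
        = ps.map (fun pc => if pc.1 = p0 then pc.2 else 0) := by
      apply List.map_congr_left
      intro pc hpc
      have := hp0min pc hpc
      by_cases h : pc.1 = p0
      · rw [if_pos (le_of_eq h), if_pos h]
      · rw [if_neg (by omega), if_neg h]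
    rw [pvWle, hcg, pv_sum_ite_key_eq ps p0 c0 hnd hp0mem]
  -- run B's loop over the tail, after the first (no-op) step
  have hpwtail := (List.pairwise_cons.1 (hits ▸ hpwits)).2
  have hheadlt := (List.pairwise_cons.1 (hits ▸ hpwits)).1
  obtain ⟨cF, bF, lF, pF, hfoldB, hble, hbatt, hblb⟩ :=
    pvB_loop ps hnd tail (pvC ps p0) (pvC ps p0) c0 p0 hpwtail
      (fun pc hpc => (hmemits pc).1 (hits ▸ List.mem_cons_of_mem _ hpc))
      (fun pc hpc => hheadlt pc hpc)
      (by
        intro pc hpc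
        have : pc ∈ its := (hmemits pc).2 hpc
        rw [hits] at this
        rcases List.mem_cons.1 this with h | h
        · exact Or.inl (le_of_eq (by rw [h]))
        · exact Or.inr (List.mem_map_of_mem h))
      rfl hleft0
  have hBval : part1_alt xs = bF := by
    have htot' : ((((p0, c0) :: tail).map (fun pc => pc.2)).sum) = pvTot ps := hits ▸ htot
    have hcost0' : ((((p0, c0) :: tail).map (fun pc => (pc.1 - p0) * pc.2)).sum) = pvC ps p0 :=
      hits ▸ hcost0
    simp only [part1_alt, ← hps, ← hitsdef, hits]
    show (((p0, c0) :: tail).foldl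
        (fun (st : Int × Int × Int × Int) pc =>
          let cost := st.1 + (pc.1 - st.2.2.2) * (2 * st.2.2.1 - (((p0, c0) :: tail).map (fun pc => pc.2)).sum)
          let best := if cost < st.2.1 then cost else st.2.1
          (cost, best, st.2.2.1 + pc.2, pc.1))
        ((((p0, c0) :: tail).map (fun pc => (pc.1 - p0) * pc.2)).sum,
         (((p0, c0) :: tail).map (fun pc => (pc.1 - p0) * pc.2)).sum, 0, p0)).2.1 = bF
    simp only [htot', hcost0', List.foldl_cons]
    have hinit : (let cost := pvC ps p0 + ((p0, c0).1 - p0) * (2 * 0 - pvTot ps);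
        let best := if cost < pvC ps p0 then cost else pvC ps p0
        (cost, best, 0 + (p0, c0).2, (p0, c0).1)) = (pvC ps p0, pvC ps p0, c0, p0) := by
      simp
    rw [hinit, hfoldB]
  -- ---- the two minima coincide ----
  have h1 : part1_alt xs ≤ part1 xs := by
    rw [hAval, hBval]
    obtain ⟨d, hd1, hd2, hdeq⟩ := hAatt
    obtain ⟨k, hk, hkle⟩ := pv_bridge ps d mn mx hmnmem hmxmem hd1 hd2
    have hbk : bF ≤ pvC ps k := by
      obtain ⟨pc, hpc, rfl⟩ := List.mem_map.1 hk
      have : pc ∈ its := (hmemits pc).2 hpc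
      rw [hits] at this
      rcases List.mem_cons.1 this with h | h
      · have hp : pc.1 = p0 := by rw [h]
        rw [hp]
        exact hble
      · exact hblb pc h
    omega
  have h2 : part1 xs ≤ part1_alt xs := by
    rw [hAval, hBval]
    have hbatt' : ∃ k ∈ ks, bF = pvC ps k := by
      rcases hbatt with h | ⟨pc, hpc, hpceq⟩
      · exact ⟨p0, List.mem_map_of_mem hp0mem, h⟩
      · refine ⟨pc.1, ?_, hpceq⟩
        exact List.mem_map_of_mem ((hmemits pc).1 (hits ▸ List.mem_cons_of_mem _ hpc))
    obtain ⟨k, hk, hkeq⟩ := hbatt'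
    have := hAlb k hk
    omega
  omega


-- ===== VERDICT (by name: the statement is the Claim_ definition above) =====
theorem part1_spec : Claim_equal_part1 := by
  intro xs _ hpre
  unfold Spec_part1
  exact pv_main xs hpre
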